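-- pv_equiv track=rewrite | github.com/hebugui/python_spider | meizitu.py | remove_some
-- ===== SOURCE A (Python) =====
-- def remove_some(lists, param):
--     move = []
--     i = len(lists)
--     for j in range(i):
--         if param in lists[j]:
--             move.append(lists[j])
--     for m in move:
--         lists.remove(m)
--     return lists
-- ===== SOURCE B (Python) =====
-- def remove_some(lists, param):
--     w = 0
--     for r in range(len(lists)):
--         if param not in lists[r]:
--             lists[w] = lists[r]
--             w += 1
--     del lists[w:]
--     return lists
-- ===== Notes on version B (the rewrite author's own statement) =====
-- stated objective: alternative
-- what changed: A collects matching elements into a second list and then calls lists.remove for each collected element (a rescan per removal); B does a single in-place two-pointer compaction pass, writing each non-matching element forward and truncating the tail, with no auxiliary list and no rescans.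
import Mathlib
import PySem

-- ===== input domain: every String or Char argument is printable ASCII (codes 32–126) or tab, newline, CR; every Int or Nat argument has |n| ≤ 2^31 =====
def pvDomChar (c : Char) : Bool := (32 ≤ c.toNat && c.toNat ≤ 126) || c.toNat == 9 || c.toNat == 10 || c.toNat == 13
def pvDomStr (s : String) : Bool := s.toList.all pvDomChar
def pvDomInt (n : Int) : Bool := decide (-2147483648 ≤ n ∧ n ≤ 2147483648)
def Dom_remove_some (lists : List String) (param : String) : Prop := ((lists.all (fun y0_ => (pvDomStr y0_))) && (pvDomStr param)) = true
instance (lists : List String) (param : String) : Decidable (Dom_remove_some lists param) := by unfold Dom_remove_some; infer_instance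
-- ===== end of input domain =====

-- B replaces A's two-phase "collect matches, then lists.remove each" with a single in-place
-- two-pointer compaction pass; equivalence proved on the return value (both Pythons mutate
-- `lists` to the same final contents).


-- ===== PORT A =====
-- first loop: move = [lists[j] for j in range(len(lists)) if param in lists[j]]
def moveA (lists : List String) (param : String) : List String :=
  (PySem.List.pyRange 0 (lists.length : Int) 1).foldl
    (fun acc j =>
      if PySem.Str.isIn param (PySem.List.pyGetD lists j "") then
        acc ++ [PySem.List.pyGetD lists j ""]
      else acc) []

-- second loop: for m in move: lists.remove(m).  'lists.remove(m)' raises ValueError only when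
-- m is absent, which never happens here (each collected occurrence is removed exactly once),
-- so the 'none' branch of remove? is unreachable.
def remove_some (lists : List String) (param : String) : List String :=
  (moveA lists param).foldl (fun ls m => (PySem.List.remove? ls m).getD ls) lists

-- ===== PORT B =====
-- loop body: if param not in lists[r]: lists[w] = lists[r]; w += 1
def stepB (param : String) (st : List String × Nat) (r : Int) : List String × Nat :=
  let x := PySem.List.pyGetD st.1 r ""
  if PySem.Str.isIn param x then st else (st.1.set st.2 x, st.2 + 1)

def remove_some_alt (lists : List String) (param : String) : List String :=
  let st := (PySem.List.pyRange 0 (lists.length : Int) 1).foldl (stepB param) (lists, 0)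
  st.1.take st.2   -- del lists[w:]

-- ===== PRECONDITION & SPEC =====
def Spec_remove_some (lists : List String) (param : String) (out : List String) : Prop := out = remove_some_alt lists param
instance (lists : List String) (param : String) (out : List String) : Decidable (Spec_remove_some lists param out) := by unfold Spec_remove_some; infer_instance

-- ===== CLAIM (what is proved, stated in full; the proofs are below) =====
def Claim_equal_remove_some : Prop := ∀ (lists : List String) (param : String), Dom_remove_some lists param → Spec_remove_some lists param (remove_some lists param)

-- ===== LEMMAS AND PROOFS =====

-- Python's list.remove (first occurrence), total form as used in the port of A.
def rem (l : List String) (m : String) : List String := (PySem.List.remove? l m).getD l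

theorem rem_cons_of_ne {h m : String} (t : List String) (hne : m ≠ h) :
    rem (h :: t) m = h :: rem t m := by
  unfold rem
  rw [PySem.List.remove?_cons_of_ne t (Ne.symm hne)]
  cases hrt : PySem.List.remove? t m <;> simp

theorem foldl_rem_shift (p : String → Bool) (h : String) (hh : p h = false) :
    ∀ (ms t : List String), (∀ m ∈ ms, p m = true) →
      ms.foldl rem (h :: t) = h :: ms.foldl rem t := by
  intro ms
  induction ms with
  | nil => intro t _; rfl
  | cons m ms ih =>
    intro t hall
    have hm : p m = true := hall m (by simp)
    have hne : m ≠ h := by intro e; rw [e, hh] at hm; exact absurd hm (by simp)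
    simp only [List.foldl_cons, rem_cons_of_ne t hne]
    exact ih (rem t m) (fun x hx => hall x (by simp [hx]))

theorem foldl_rem_filter (p : String → Bool) :
    ∀ (ls : List String), (ls.filter p).foldl rem ls = ls.filter (fun x => !p x) := by
  intro ls
  induction ls with
  | nil => rfl
  | cons h t ih =>
    by_cases hp : p h = true
    · simp only [List.filter_cons, hp, if_pos trivial, List.foldl_cons]
      have hrm : rem (h :: t) h = t := by unfold rem; simp
      simp [hrm, ih]
    · have hpf : p h = false := by simpa using hp
      simp only [List.filter_cons, hpf, Bool.false_eq_true, if_false, Bool.not_false, if_true]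
      rw [foldl_rem_shift p h hpf (t.filter p) t (by intro m hm; exact (List.mem_filter.mp hm).2)]
      rw [ih]

-- A computes the filter of non-matching elements.
theorem remove_some_eq_filter (lists : List String) (param : String) :
    remove_some lists param = lists.filter (fun x => !PySem.Str.isIn param x) := by
  unfold remove_some moveA
  rw [PySem.List.foldl_pyRange_zero_pyGetD' lists ""
        (fun acc x => if PySem.Str.isIn param x then acc ++ [x] else acc) []]
  rw [PySem.List.foldl_append_if_eq_filter]
  simpa using foldl_rem_filter (fun x => PySem.Str.isIn param x) lists

theorem take_set_succ {α : Type} (ls : List α) (w : Nat) (x : α) (h : w < ls.length) :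
    (ls.set w x).take (w + 1) = ls.take w ++ [x] := by
  rw [List.set_eq_take_append_cons_drop, if_pos h, List.take_append]
  simp [List.take_take, List.length_take, Nat.min_eq_left h.le]

-- B's compaction loop invariant: kept prefix = filter of the scanned prefix, tail untouched.
theorem alt_loop (orig : List String) (param : String) :
    ∀ (k r : Nat) (ls : List String) (w : Nat),
      r + k = orig.length →
      ls.length = orig.length →
      ls.drop r = orig.drop r →
      ls.take w = (orig.take r).filter (fun x => !PySem.Str.isIn param x) →
      w ≤ r →
      (let st := (PySem.List.pyRange (r : Int) (orig.length : Int) 1).foldl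
          (stepB param) (ls, w)
       st.1.take st.2) = orig.filter (fun x => !PySem.Str.isIn param x) := by
  intro k
  induction k with
  | zero =>
    intro r ls w hrk hlen hdrop htake hwr
    have hr : r = orig.length := by omega
    rw [PySem.List.pyRange_one_eq_nil (by exact_mod_cast le_of_eq hr.symm)]
    simpa [hr] using htake
  | succ k ih =>
    intro r ls w hrk hlen hdrop htake hwr
    have hrlt : r < orig.length := by omega
    have hcons : PySem.List.pyRange (r : Int) (orig.length : Int) 1
        = (r : Int) :: PySem.List.pyRange ((r : Int) + 1) (orig.length : Int) 1 :=
      PySem.List.pyRange_one_cons (by exact_mod_cast hrlt)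
    have hrls : r < ls.length := by omega
    have hcast : ((r : Int) + 1) = ((r + 1 : Nat) : Int) := by push_cast; ring
    have h0 : ls[r]? = orig[r]? := by
      have h1 := congrArg (fun l => l[0]?) hdrop
      simpa [List.getElem?_drop] using h1
    have hx : PySem.List.pyGetD ls (r : Int) "" = orig[r] := by
      rw [PySem.List.pyGetD_natCast]
      simp [List.getD, h0, List.getElem?_eq_getElem hrlt]
    have htk : orig.take (r + 1) = orig.take r ++ [orig[r]] := by
      rw [List.take_add_one, List.getElem?_eq_getElem hrlt]
      rfl
    rw [hcons]
    simp only [List.foldl_cons]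
    by_cases hp : PySem.Str.isIn param orig[r] = true
    · have hp' : PySem.Chars.isIn param.toList orig[r].toList = true := by simpa using hp
      have hstep : stepB param (ls, w) (r : Int) = (ls, w) := by
        unfold stepB; rw [hx, if_pos hp]
      rw [hstep, hcast]
      exact ih (r + 1) ls w (by omega) hlen
        (by rw [← List.drop_drop, ← List.drop_drop, hdrop])
        (by rw [htake, htk, List.filter_append]; simp [hp'])
        (by omega)
    · have hpf : PySem.Str.isIn param orig[r] = false := by simpa using hp
      have hpf' : PySem.Chars.isIn param.toList orig[r].toList = false := by simpa using hp
      have hstep : stepB param (ls, w) (r : Int) = (ls.set w orig[r], w + 1) := by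
        unfold stepB; rw [hx, if_neg (by simp [hpf'])]
      rw [hstep, hcast]
      exact ih (r + 1) (ls.set w orig[r]) (w + 1) (by omega)
        (by simp [hlen])
        (by rw [List.drop_set_of_lt (by omega : w < r + 1),
                ← List.drop_drop, ← List.drop_drop, hdrop])
        (by rw [take_set_succ ls w orig[r] (by omega), htk, List.filter_append, htake]
            simp [hpf'])
        (by omega)

theorem remove_some_alt_eq_filter (lists : List String) (param : String) :
    remove_some_alt lists param = lists.filter (fun x => !PySem.Str.isIn param x) := by
  unfold remove_some_alt
  have := alt_loop lists param lists.length 0 lists 0 (by omega) rfl rfl (by simp) (by omega)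
  simpa using this

-- ===== VERDICT (by name: the statement is the Claim_ definition above) =====
theorem remove_some_spec : Claim_equal_remove_some := by
  intro lists param _
  unfold Spec_remove_some
  rw [remove_some_eq_filter, remove_some_alt_eq_filter]
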